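-- pv_equiv track=rewrite | github.com/YuanPeiqi/Top_K | top_k/top_k.py | enumerate_Ce
-- ===== SOURCE A (Python) =====
-- def dfs_Ce(aggregation, combination, depth, level, Ce, Ces):
--     if level == 0:
--         Ces.append(Ce)
--         return
--     if level == depth:
--         for agg in aggregation:
--             Ce = [agg]
--             dfs_Ce(aggregation, combination, depth, level - 1, Ce, Ces)
--     else:
--         for com in combination:
--             temp = [item for item in Ce]
--             temp.append(com)
--             dfs_Ce(aggregation, combination, depth, level - 1, temp, Ces)
--
-- def enumerate_Ce(headers, measure, time_col, depth):
--     # enumerate all valid Ce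
--     extractors = ['rank', '%', 'avg']
--     combination = [('prev', time_col)]
--     # aggregation = [('SUM', measure), ('COUNT', measure), ('AVERAGE', measure), ('MAX', measure), ('MIN', measure)]
--     aggregation = [('SUM', measure)]
--     for header in headers:
--         for extractor in extractors:
--             combination.append((extractor, header))
--     Ces = []
--     dfs_Ce(aggregation, combination, depth, depth, [], Ces)
--     return Ces
-- ===== SOURCE B (Python) =====
-- def enumerate_Ce(headers, measure, time_col, depth):
--     # iterative breadth-first build instead of the recursive DFS
--     if depth == 0:
--         return [[]]
--     extractors = ['rank', '%', 'avg']
--     combination = [('prev', time_col)] + [(e, h) for h in headers for e in extractors]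
--     results = [[('SUM', measure)]]
--     for _ in range(depth - 1):
--         results = [r + [c] for r in results for c in combination]
--     return results
-- ===== Notes on version B (the rewrite author's own statement) =====
-- stated objective: simpler
-- what changed: Replaces the recursive depth-first dfs_Ce with a shared-accumulator Ces by an iterative breadth-first product build: start from [[agg]] and extend every partial row by each combination element depth-1 times.
import Mathlib
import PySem

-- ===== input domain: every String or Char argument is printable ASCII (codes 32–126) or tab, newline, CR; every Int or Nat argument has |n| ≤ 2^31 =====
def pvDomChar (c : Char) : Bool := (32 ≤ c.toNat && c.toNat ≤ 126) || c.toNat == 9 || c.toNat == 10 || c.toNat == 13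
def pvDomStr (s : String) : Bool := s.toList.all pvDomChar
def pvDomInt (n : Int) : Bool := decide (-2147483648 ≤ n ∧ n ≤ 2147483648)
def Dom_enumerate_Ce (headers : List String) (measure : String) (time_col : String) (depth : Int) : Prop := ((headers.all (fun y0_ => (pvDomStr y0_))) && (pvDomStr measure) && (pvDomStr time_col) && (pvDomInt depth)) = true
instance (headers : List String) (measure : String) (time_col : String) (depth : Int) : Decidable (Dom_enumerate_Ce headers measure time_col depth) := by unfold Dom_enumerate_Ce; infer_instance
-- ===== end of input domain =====

-- B replaces A's recursive depth-first dfs_Ce by an iterative breadth-first product build (simpler decomposition, same output).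


-- ===== PORT A =====
-- dfs_Ce, transliterated; the recursion on the Int `level` is driven by a fuel
-- parameter (a totality guard only: the top call passes depth.toNat + 1, which
-- is enough fuel for every non-negative depth, exactly the Pre_ domain).
def dfsCe (aggregation combination : List (String × String)) (depth : Int) :
    Nat → Int → List (String × String) → List (List (String × String)) → List (List (String × String))
  | 0, _, _, Ces => Ces
  | fuel + 1, level, Ce, Ces =>
    if level = 0 then Ces ++ [Ce]
    else if level = depth then
      aggregation.foldl (fun acc agg => dfsCe aggregation combination depth fuel (level - 1) [agg] acc) Ces
    else
      combination.foldl (fun acc com => dfsCe aggregation combination depth fuel (level - 1) (Ce ++ [com]) acc) Ces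

def enumerate_Ce (headers : List String) (measure : String) (time_col : String) (depth : Int) : List (List (String × String)) :=
  let extractors := ["rank", "%", "avg"]
  let combination :=
    headers.foldl (fun comb header =>
      extractors.foldl (fun comb2 extractor => comb2 ++ [(extractor, header)]) comb)
      [("prev", time_col)]
  let aggregation := [("SUM", measure)]
  dfsCe aggregation combination depth (depth.toNat + 1) depth [] []

-- ===== PORT B =====
def enumerate_Ce_alt (headers : List String) (measure : String) (time_col : String) (depth : Int) : List (List (String × String)) :=
  if depth = 0 then [[]]
  else
    let extractors := ["rank", "%", "avg"]
    let combination := ("prev", time_col) :: headers.flatMap (fun h => extractors.map (fun e => (e, h)))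
    let init : List (List (String × String)) := [[("SUM", measure)]]
    (List.range (depth - 1).toNat).foldl
      (fun results _ => results.flatMap (fun r => combination.map (fun c => r ++ [c]))) init

-- ===== PRECONDITION & SPEC =====
-- Pre_ excludes depth < 0, on which A's recursion never reaches its base case and raises RecursionError.
def Pre_enumerate_Ce (headers : List String) (measure : String) (time_col : String) (depth : Int) : Prop := 0 ≤ depth
instance (headers : List String) (measure : String) (time_col : String) (depth : Int) : Decidable (Pre_enumerate_Ce headers measure time_col depth) := by unfold Pre_enumerate_Ce; infer_instance
def pvWitness_enumerate_Ce : List String × String × String × Int := (["h"], "m", "t", 2)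

def Spec_enumerate_Ce (headers : List String) (measure : String) (time_col : String) (depth : Int) (out : List (List (String × String))) : Prop := out = enumerate_Ce_alt headers measure time_col depth
instance (headers : List String) (measure : String) (time_col : String) (depth : Int) (out : List (List (String × String))) : Decidable (Spec_enumerate_Ce headers measure time_col depth out) := by unfold Spec_enumerate_Ce; infer_instance

-- ===== CLAIM (what is proved, stated in full; the proofs are below) =====
def Claim_equal_enumerate_Ce : Prop := ∀ (headers : List String) (measure : String) (time_col : String) (depth : Int), Dom_enumerate_Ce headers measure time_col depth → Pre_enumerate_Ce headers measure time_col depth → Spec_enumerate_Ce headers measure time_col depth (enumerate_Ce headers measure time_col depth)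

-- ===== LEMMAS AND PROOFS =====

-- B's one breadth-first extension step, and its n-fold iteration.
def stepCe (com : List (String × String)) (rs : List (List (String × String))) : List (List (String × String)) :=
  rs.flatMap (fun r => com.map (fun c => r ++ [c]))

def stepIter (com : List (String × String)) : Nat → List (List (String × String)) → List (List (String × String))
  | 0, rs => rs
  | n + 1, rs => stepIter com n (stepCe com rs)

theorem stepCe_append (com : List (String × String)) (l1 l2 : List (List (String × String))) :
    stepCe com (l1 ++ l2) = stepCe com l1 ++ stepCe com l2 := by
  simp [stepCe]

theorem stepIter_append (com : List (String × String)) (n : Nat) (l1 l2 : List (List (String × String))) :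
    stepIter com n (l1 ++ l2) = stepIter com n l1 ++ stepIter com n l2 := by
  induction n generalizing l1 l2 with
  | zero => rfl
  | succ n ih => simp [stepIter, stepCe_append, ih]

theorem stepIter_nil (com : List (String × String)) (n : Nat) : stepIter com n [] = [] := by
  induction n with
  | zero => rfl
  | succ n ih => simpa [stepIter, stepCe] using ih

theorem stepIter_flatMap (com : List (String × String)) (n : Nat)
    (l : List (String × String)) (f : String × String → List (String × String)) :
    stepIter com n (l.map (fun c => f c)) = l.flatMap (fun c => stepIter com n [f c]) := by
  induction l with
  | nil => exact stepIter_nil com n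
  | cons x xs ih =>
      have : (x :: xs).map (fun c => f c) = [f x] ++ xs.map (fun c => f c) := by simp
      rw [this, stepIter_append, ih]; simp

-- dfs_Ce below the top level: at level n < depth with fuel n+1 it appends all
-- n-fold extensions of Ce, in B's breadth-first order.
theorem dfsCe_mid (agg com : List (String × String)) (depth : Int) (n : Nat) (hn : (n : Int) < depth) :
    ∀ (Ce : List (String × String)) (Ces : List (List (String × String))),
      dfsCe agg com depth (n + 1) (n : Int) Ce Ces = Ces ++ stepIter com n [Ce] := by
  induction n with
  | zero => intro Ce Ces; simp [dfsCe, stepIter]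
  | succ n ih =>
      intro Ce Ces
      have h0 : ((n + 1 : Nat) : Int) ≠ 0 := by push_cast; omega
      have hd : ((n + 1 : Nat) : Int) ≠ depth := by omega
      have hn' : (n : Int) < depth := by push_cast at hn ⊢; omega
      have hcast : ((n + 1 : Nat) : Int) - 1 = (n : Int) := by push_cast; ring
      rw [dfsCe, if_neg h0, if_neg hd]
      have hfold : ∀ (Ces' : List (List (String × String))),
          com.foldl (fun acc c => dfsCe agg com depth (n + 1) (((n + 1 : Nat) : Int) - 1) (Ce ++ [c]) acc) Ces'
            = Ces' ++ com.flatMap (fun c => stepIter com n [Ce ++ [c]]) := by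
        intro Ces'
        induction com generalizing Ces' with
        | nil => simp
        | cons c cs ihc => simp [List.foldl_cons, ih hn', List.flatMap_def]
      rw [hfold]
      congr 1
      show com.flatMap (fun c => stepIter com n [Ce ++ [c]]) = stepIter com (n + 1) [Ce]
      have : stepCe com [Ce] = com.map (fun c => Ce ++ [c]) := by simp [stepCe]
      rw [stepIter, this, stepIter_flatMap]

-- B's range-foldl is stepIter.
theorem foldl_range_stepIter (com : List (String × String)) (n : Nat) (init : List (List (String × String))) :
    (List.range n).foldl (fun rs _ => stepCe com rs) init = stepIter com n init := by
  induction n generalizing init with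
  | zero => rfl
  | succ n ih =>
      rw [List.range_succ_eq_map]
      simp only [List.foldl_cons, List.foldl_map]
      exact ih (stepCe com init)

-- A's nested append loops build B's combination list.
theorem combination_eq (headers : List String) (time_col : String) :
    headers.foldl (fun comb header =>
        (["rank", "%", "avg"]).foldl (fun comb2 extractor => comb2 ++ [(extractor, header)]) comb)
      [("prev", time_col)]
    = ("prev", time_col) :: headers.flatMap (fun h => (["rank", "%", "avg"]).map (fun e => (e, h))) := by
  have h : ∀ (init : List (String × String)),
      headers.foldl (fun comb header =>
        (["rank", "%", "avg"]).foldl (fun comb2 extractor => comb2 ++ [(extractor, header)]) comb) init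
      = init ++ headers.flatMap (fun h => (["rank", "%", "avg"]).map (fun e => (e, h))) := by
    intro init
    induction headers generalizing init with
    | nil => simp
    | cons h hs ih => simp [List.foldl_cons, List.flatMap_def]
  simpa using h [("prev", time_col)]

-- ===== VERDICT (by name: the statement is the Claim_ definition above) =====
theorem enumerate_Ce_spec : Claim_equal_enumerate_Ce := by
  intro headers measure time_col depth _ hpre
  unfold Spec_enumerate_Ce enumerate_Ce enumerate_Ce_alt
  simp only []
  rw [combination_eq]
  set com := ("prev", time_col) :: headers.flatMap (fun h => (["rank", "%", "avg"]).map (fun e => (e, h))) with hcom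
  by_cases h0 : depth = 0
  · subst h0; simp [dfsCe]
  · have hpos : 0 < depth := lt_of_le_of_ne hpre (Ne.symm h0)
    rw [if_neg h0]
    obtain ⟨n, hn⟩ : ∃ n : Nat, depth = (n : Int) + 1 := ⟨(depth - 1).toNat, by omega⟩
    have htoNat : depth.toNat = n + 1 := by omega
    have hsub : (depth - 1).toNat = n := by omega
    rw [htoNat, hsub]
    have hne0 : depth ≠ 0 := h0
    rw [dfsCe, if_neg hne0, if_pos rfl]
    have hcast : depth - 1 = (n : Int) := by omega
    have hnlt : (n : Int) < depth := by omega
    simp only [List.foldl_cons, List.foldl_nil, hcast]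
    rw [dfsCe_mid [("SUM", measure)] com depth n hnlt [("SUM", measure)] []]
    simp only [List.nil_append]
    exact (foldl_range_stepIter com n [[("SUM", measure)]]).symm
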